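-- pv_equiv track=rewrite | github.com/Shadeiax/AdventOfCode | 2024/day 9 (task 2 unfinished)/task1.py | new_compact
-- ===== SOURCE A (Python) =====
-- def new_compact(input):
--     nums = [i for i in input if i.isdigit()]
--     inds = [i for i in range(len(input)) if input[i] == "."]
--     new = [char for char in input]
--     for i in range(len(inds)):
--         new[inds[i]] = nums[len(nums) - 1 - i]
--     for i in range(len(inds)):
--         pass
--         new.pop()
--     return new
-- ===== SOURCE B (Python) =====
-- def new_compact(input):
--     nums = [c for c in input if c.isdigit()]
--     d = input.count(".")
--     j = len(nums) - 1
--     out = []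
--     for c in input[:len(input) - d]:
--         if c == ".":
--             out.append(nums[j])
--             j -= 1
--         else:
--             out.append(c)
--     return out
-- ===== Notes on version B (the rewrite author's own statement) =====
-- stated objective: simpler
-- what changed: A builds an index table of dot positions, scatters digits into a copy of the input by indexed assignment, then pops the tail; B makes one forward pass over the kept prefix with a single decrementing pointer into the digit list, appending as it goes.
-- outside the precondition, e.g. on new_compact('.'): A raises IndexError, B returns []
import Mathlib
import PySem

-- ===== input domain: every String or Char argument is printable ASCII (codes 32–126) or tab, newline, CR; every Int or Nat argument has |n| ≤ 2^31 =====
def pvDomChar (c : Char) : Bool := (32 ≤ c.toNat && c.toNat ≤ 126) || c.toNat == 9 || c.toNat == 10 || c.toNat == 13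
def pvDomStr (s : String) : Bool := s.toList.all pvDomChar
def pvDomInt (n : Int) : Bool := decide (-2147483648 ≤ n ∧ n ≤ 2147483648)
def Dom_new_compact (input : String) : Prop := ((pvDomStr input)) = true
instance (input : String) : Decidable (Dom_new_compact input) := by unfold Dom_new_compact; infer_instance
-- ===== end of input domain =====

-- B replaces A's dot-index table + scatter-assignment + tail-popping with one forward pass
-- over the kept prefix driven by a single decrementing pointer into the digit list (simpler).


-- ===== PORT A =====
def new_compact (input : String) : List String :=
  let cs := input.toList
  let nums : List String := (cs.filter (fun c => PySem.Chars.isdigit c)).map (fun c => String.mk [c])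
  let inds : List Nat := (List.range cs.length).filter (fun i => cs.getD i ' ' == '.')
  let new0 : List String := cs.map (fun c => String.mk [c])
  let new1 := (List.range inds.length).foldl
      (fun new i => new.set (inds.getD i 0)
        (PySem.List.pyGetD nums ((nums.length : Int) - 1 - (i : Int)) "")) new0
  (List.range inds.length).foldl (fun new _ => new.dropLast) new1

-- ===== PORT B =====
def new_compact_alt (input : String) : List String :=
  let cs := input.toList
  let nums : List String := (cs.filter (fun c => PySem.Chars.isdigit c)).map (fun c => String.mk [c])
  let d := cs.count '.'
  ((PySem.List.slice cs none (some ((cs.length : Int) - (d : Int)))).foldl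
      (fun (st : List String × Int) c =>
        if c == '.' then (st.1 ++ [PySem.List.pyGetD nums st.2 ""], st.2 - 1)
        else (st.1 ++ [String.mk [c]], st.2)) ([], (nums.length : Int) - 1)).1

-- ===== PRECONDITION & SPEC =====
-- Pre_ excludes exactly the inputs where Python A raises IndexError: more '.' characters
-- than twice the number of digit characters.
def Pre_new_compact (input : String) : Prop :=
  input.toList.count '.' ≤ 2 * input.toList.countP (fun c => PySem.Chars.isdigit c)
instance (input : String) : Decidable (Pre_new_compact input) := by unfold Pre_new_compact; infer_instance
def pvWitness_new_compact : String := "2.33.13"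

def Spec_new_compact (input : String) (out : List String) : Prop := out = new_compact_alt input
instance (input : String) (out : List String) : Decidable (Spec_new_compact input out) := by unfold Spec_new_compact; infer_instance

-- ===== CLAIM (what is proved, stated in full; the proofs are below) =====
def Claim_equal_new_compact : Prop := ∀ (input : String), Dom_new_compact input → Pre_new_compact input → Spec_new_compact input (new_compact input)

-- ===== LEMMAS AND PROOFS =====

-- the forward pass of B as structural recursion
def gRun (nums : List String) : List Char → Int → List String
  | [], _ => []
  | c :: t, j =>
      if c = '.' then PySem.List.pyGetD nums j "" :: gRun nums t (j - 1)
      else String.mk [c] :: gRun nums t j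

lemma foldB (nums : List String) (l : List Char) (acc : List String) (j : Int) :
    (l.foldl (fun (st : List String × Int) c =>
        if c == '.' then (st.1 ++ [PySem.List.pyGetD nums st.2 ""], st.2 - 1)
        else (st.1 ++ [String.mk [c]], st.2)) (acc, j)).1 = acc ++ gRun nums l j := by
  induction l generalizing acc j with
  | nil => simp [gRun]
  | cons c t ih =>
    simp only [beq_iff_eq] at ih ⊢
    by_cases hc : c = '.' <;> simp [gRun, hc, ih]

lemma gRun_length (nums : List String) (l : List Char) (j : Int) :
    (gRun nums l j).length = l.length := by
  induction l generalizing j with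
  | nil => simp [gRun]
  | cons c t ih => by_cases hc : c = '.' <;> simp [gRun, hc, ih]

lemma gRun_getD (nums : List String) (l : List Char) (j : Int) (p : Nat) (hp : p < l.length) :
    (gRun nums l j).getD p "" =
      if l.getD p ' ' = '.' then PySem.List.pyGetD nums (j - ((l.take p).count '.' : Int)) ""
      else String.mk [l.getD p ' '] := by
  induction l generalizing j p with
  | nil => simp at hp
  | cons c t ih =>
    cases p with
    | zero => by_cases hc : c = '.' <;> simp [gRun, hc]
    | succ p =>
      simp only [List.length_cons, Nat.succ_lt_succ_iff] at hp
      by_cases hc : c = '.'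
      · subst hc
        rw [show gRun nums ('.' :: t) j = PySem.List.pyGetD nums j "" :: gRun nums t (j - 1) from by simp [gRun],
            List.getD_cons_succ, ih _ _ hp, List.getD_cons_succ, List.take_succ_cons,
            List.count_cons_self]
        split_ifs with hd
        · congr 1
          push_cast
          ring
        · rfl
      · rw [show gRun nums (c :: t) j = String.mk [c] :: gRun nums t j from
              by simp only [gRun]; rw [if_neg hc],
            List.getD_cons_succ, ih _ _ hp, List.getD_cons_succ, List.take_succ_cons,
            List.count_cons_of_ne hc]

-- positions of dots (= A's inds) and A's scatter loop, named for the proofs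
def indsOf (cs : List Char) : List Nat :=
  (List.range cs.length).filter (fun i => cs.getD i ' ' == '.')

def scat (cs : List Char) (nums : List String) (k : Nat) : List String :=
  (List.range k).foldl
    (fun new i => new.set ((indsOf cs).getD i 0)
      (PySem.List.pyGetD nums ((nums.length : Int) - 1 - (i : Int)) ""))
    (cs.map (fun c => String.mk [c]))

lemma inds_cons (c : Char) (t : List Char) :
    indsOf (c :: t) = (if c = '.' then [0] else []) ++ (indsOf t).map (· + 1) := by
  unfold indsOf
  simp only [List.length_cons, List.range_succ_eq_map, List.filter_cons, List.filter_map]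
  by_cases hc : c = '.' <;>
    simp [hc, Function.comp_def, Nat.succ_eq_add_one]

lemma inds_length (cs : List Char) : (indsOf cs).length = cs.count '.' := by
  induction cs with
  | nil => rfl
  | cons c t ih =>
    rw [inds_cons]
    by_cases hc : c = '.' <;> simp [hc, ih, List.count_cons]

lemma inds_spec (cs : List Char) (k : Nat) (hk : k < (indsOf cs).length) :
    (indsOf cs).getD k 0 < cs.length ∧ cs.getD ((indsOf cs).getD k 0) ' ' = '.' ∧
      (cs.take ((indsOf cs).getD k 0)).count '.' = k := by
  induction cs generalizing k with
  | nil => simp [indsOf] at hk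
  | cons c t ih =>
    by_cases hc : c = '.'
    · have hi : indsOf (c :: t) = 0 :: (indsOf t).map (· + 1) := by
        rw [inds_cons, if_pos hc]; rfl
      subst hc
      rw [hi] at hk ⊢
      cases k with
      | zero => refine ⟨by simp, by simp, by simp⟩
      | succ k =>
        simp only [List.length_cons, List.length_map, Nat.succ_lt_succ_iff] at hk
        obtain ⟨h1, h2, h3⟩ := ih k hk
        rw [List.getD_cons_succ, List.getD_eq_getElem _ _ (by simpa using hk),
            List.getElem_map, ← List.getD_eq_getElem _ _ hk]
        refine ⟨by simpa using Nat.succ_lt_succ h1, ?_, ?_⟩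
        · simpa [List.getD_cons_succ] using h2
        · simp only [List.take_succ_cons, List.count_cons_self]
          omega
    · have hi : indsOf (c :: t) = (indsOf t).map (· + 1) := by
        rw [inds_cons, if_neg hc]; rfl
      rw [hi] at hk ⊢
      simp only [List.length_map] at hk
      obtain ⟨h1, h2, h3⟩ := ih k hk
      rw [List.getD_eq_getElem _ _ (by simpa using hk),
          List.getElem_map, ← List.getD_eq_getElem _ _ hk]
      refine ⟨by simpa using Nat.succ_lt_succ h1, ?_, ?_⟩
      · simpa [List.getD_cons_succ] using h2
      · simp only [List.take_succ_cons, List.count_cons_of_ne hc]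
        exact h3

lemma rank_spec (cs : List Char) (p : Nat) (hp : p < cs.length) (hd : cs.getD p ' ' = '.') :
    (cs.take p).count '.' < (indsOf cs).length ∧
      (indsOf cs).getD ((cs.take p).count '.') 0 = p := by
  induction cs generalizing p with
  | nil => simp at hp
  | cons c t ih =>
    cases p with
    | zero =>
      have hc : c = '.' := by simpa using hd
      subst hc
      simp [inds_cons]
    | succ p =>
      simp only [List.length_cons, Nat.succ_lt_succ_iff] at hp
      have hd' : t.getD p ' ' = '.' := by simpa [List.getD_cons_succ] using hd
      obtain ⟨h1, h2⟩ := ih p hp hd'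
      by_cases hc : c = '.'
      · have hi : indsOf (c :: t) = 0 :: (indsOf t).map (· + 1) := by
          rw [inds_cons, if_pos hc]; rfl
        subst hc
        rw [hi]
        simp only [List.take_succ_cons, List.count_cons_self]
        constructor
        · simpa using Nat.succ_lt_succ h1
        · rw [List.getD_cons_succ, List.getD_eq_getElem _ _ (by simpa using h1),
              List.getElem_map, ← List.getD_eq_getElem _ _ h1, h2]
      · have hi : indsOf (c :: t) = (indsOf t).map (· + 1) := by
          rw [inds_cons, if_neg hc]; rfl
        rw [hi]
        simp only [List.take_succ_cons, List.count_cons_of_ne hc]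
        constructor
        · simpa using h1
        · rw [List.getD_eq_getElem _ _ (by simpa using h1), List.getElem_map,
              ← List.getD_eq_getElem _ _ h1, h2]

lemma scat_length (cs : List Char) (nums : List String) (k : Nat) :
    (scat cs nums k).length = cs.length := by
  induction k with
  | zero => simp [scat]
  | succ k ih =>
    unfold scat at ih ⊢
    rw [List.range_succ, List.foldl_append]
    simp only [List.foldl_cons, List.foldl_nil, List.length_set]
    exact ih

lemma getD_set_ne {α : Type} (l : List α) (i j : Nat) (v d : α) (h : j ≠ i) :
    (l.set i v).getD j d = l.getD j d := by
  simp [List.getD, List.getElem?_set_ne (fun hh => h hh.symm)]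

lemma scat_getD (cs : List Char) (nums : List String) (k : Nat)
    (hk : k ≤ (indsOf cs).length) (p : Nat) :
    (scat cs nums k).getD p "" =
      if p < cs.length ∧ cs.getD p ' ' = '.' ∧ (cs.take p).count '.' < k then
        PySem.List.pyGetD nums ((nums.length : Int) - 1 - ((cs.take p).count '.' : Int)) ""
      else (cs.map (fun c => String.mk [c])).getD p "" := by
  induction k with
  | zero => simp [scat]
  | succ k ih =>
    have hkl : k < (indsOf cs).length := hk
    obtain ⟨hq1, hq2, hq3⟩ := inds_spec cs k hkl
    have hscat : scat cs nums (k + 1) = (scat cs nums k).set ((indsOf cs).getD k 0)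
        (PySem.List.pyGetD nums ((nums.length : Int) - 1 - (k : Int)) "") := by
      unfold scat
      rw [List.range_succ, List.foldl_append]
      simp only [List.foldl_cons, List.foldl_nil]
    rw [hscat]
    by_cases hpq : p = (indsOf cs).getD k 0
    · subst hpq
      rw [List.getD_eq_getElem _ _ (by rw [List.length_set, scat_length]; exact hq1),
          List.getElem_set_self]
      rw [if_pos ⟨hq1, hq2, by rw [hq3]; omega⟩, hq3]
    · rw [getD_set_ne _ _ _ _ _ hpq, ih (le_of_lt hk)]
      by_cases hcond : p < cs.length ∧ cs.getD p ' ' = '.' ∧ (cs.take p).count '.' < k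
      · rw [if_pos hcond, if_pos ⟨hcond.1, hcond.2.1, by omega⟩]
      · have hC2 : ¬(p < cs.length ∧ cs.getD p ' ' = '.' ∧ (cs.take p).count '.' < k + 1) := by
          rintro ⟨h1, h2, h3⟩
          have h4 : ¬ (cs.take p).count '.' < k := fun h => hcond ⟨h1, h2, h⟩
          have hrk : (cs.take p).count '.' = k := by omega
          obtain ⟨hr1, hr2⟩ := rank_spec cs p h1 h2
          exact hpq (by rw [← hr2, hrk])
        rw [if_neg hcond, if_neg hC2]

lemma pops_eq_take {α : Type} (k : Nat) (l : List α) :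
    (List.range k).foldl (fun l _ => l.dropLast) l = l.take (l.length - k) := by
  induction k generalizing l with
  | zero => simp
  | succ k ih =>
    rw [List.range_succ, List.foldl_append, ih]
    simp [List.dropLast_eq_take, List.take_take]
    omega

lemma main_eq (cs : List Char) (nums : List String) :
    (List.range (indsOf cs).length).foldl (fun new _ => new.dropLast)
        (scat cs nums (indsOf cs).length) =
      ((PySem.List.slice cs none (some ((cs.length : Int) - (cs.count '.' : Int)))).foldl
        (fun (st : List String × Int) c =>
          if c == '.' then (st.1 ++ [PySem.List.pyGetD nums st.2 ""], st.2 - 1)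
          else (st.1 ++ [String.mk [c]], st.2)) ([], (nums.length : Int) - 1)).1 := by
  have hd : (indsOf cs).length = cs.count '.' := inds_length cs
  have hdle : cs.count '.' ≤ cs.length := List.count_le_length
  rw [pops_eq_take, scat_length, hd]
  rw [show ((cs.length : Int) - (cs.count '.' : Int)) = ((cs.length - cs.count '.' : Nat) : Int)
        from by push_cast [hdle]; ring,
      PySem.List.slice_to_natCast, foldB, List.nil_append]
  set L := cs.length - cs.count '.' with hL
  apply List.ext_getElem
  · rw [List.length_take, scat_length, gRun_length, List.length_take]
  · intro p hp1 hp2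
    have hpL : p < L := by
      rw [List.length_take] at hp1
      omega
    have hplen : p < cs.length := by
      rw [List.length_take] at hp1
      omega
    have hptake : p < (cs.take L).length := by
      rw [List.length_take]
      omega
    rw [List.getElem_take, ← List.getD_eq_getElem _ "" (by rw [scat_length]; exact hplen),
        ← List.getD_eq_getElem _ "" hp2,
        scat_getD cs nums (cs.count '.') (le_of_eq hd.symm) p,
        gRun_getD nums (cs.take L) _ p hptake]
    have htc : (cs.take L).getD p ' ' = cs.getD p ' ' := by
      rw [List.getD_eq_getElem _ _ hptake, List.getElem_take,
          ← List.getD_eq_getElem _ _ hplen]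
    have hcnt : (cs.take L).take p = cs.take p := by
      rw [List.take_take, min_eq_left (le_of_lt hpL)]
    rw [htc, hcnt]
    by_cases hdot : cs.getD p ' ' = '.'
    · obtain ⟨hr1, _⟩ := rank_spec cs p hplen hdot
      rw [if_pos ⟨hplen, hdot, by omega⟩, if_pos hdot]
    · rw [if_neg (fun h => hdot h.2.1), if_neg hdot,
          List.getD_eq_getElem _ _ (by rw [List.length_map]; exact hplen), List.getElem_map,
          ← List.getD_eq_getElem _ _ hplen]

-- ===== VERDICT (by name: the statement is the Claim_ definition above) =====
theorem new_compact_spec : Claim_equal_new_compact := by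
  unfold Claim_equal_new_compact
  intro input _ _
  simp only [Spec_new_compact, new_compact, new_compact_alt]
  exact main_eq input.toList
    ((input.toList.filter (fun c => PySem.Chars.isdigit c)).map (fun c => String.mk [c]))
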